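-- pv_equiv track=rewrite | github.com/hitbox/scratch | pygame/pygamelib.py | best_name_colors
-- ===== SOURCE A (Python) =====
-- import itertools as it
-- import operator as op
-- import string
--
-- def sorted_groupby(iterable, key=None, reverse=False):
--     """
--     Convenience for sorting and then grouping.
--     """
--     return it.groupby(sorted(iterable, key=key, reverse=reverse), key=key)
--
-- def get_digits(s):
--     # TODO: move this func
--     for char in s:
--         if char in string.digits:
--             yield char
--
-- def best_name_colors(color_items):
--     # NOTES
--     # - pygame.color.THECOLORS has many names for some colors
--     # - for instance 'grey100', 'gray100', and 'white' are all white.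
--     # - also 'red' and 'red1' are the same.
--     # Here, we group color items by the tuple value and yield the highest
--     # quality name. We prefer least amount of digits in name.
--     second = op.itemgetter(1)
--     grouped = sorted_groupby(color_items, key=second)
--
--     def _quality(color_item):
--         # count of digits in key
--         key, val = color_item
--         return len(list(get_digits(key)))
--
--     for _, color_items in grouped:
--         color_items = sorted(color_items, key=_quality)
--         yield color_items[0]
-- ===== SOURCE B (Python) =====
-- import string
--
-- def best_name_colors(color_items):
--     # For each distinct color value (in ascending value order), yield the
--     # first item bearing that value whose name has the fewest ASCII digits.
--     def digits(name):
--         return sum(1 for c in name if c in string.digits)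
--     seen = set()
--     for _, value in color_items:
--         seen.add(value)
--     for value in sorted(seen):
--         yield min((item for item in color_items if item[1] == value),
--                   key=lambda item: digits(item[0]))
-- ===== Notes on version B (the rewrite author's own statement) =====
-- stated objective: simpler
-- what changed: Replaces sort + itertools.groupby + a per-group stable sort by a direct decomposition: collect the distinct color values into a set, and for each value in ascending order take min() of the items with that value keyed by ASCII-digit count (Python's min keeps the first minimal item, matching the stable sort's head).
import Mathlib
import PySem

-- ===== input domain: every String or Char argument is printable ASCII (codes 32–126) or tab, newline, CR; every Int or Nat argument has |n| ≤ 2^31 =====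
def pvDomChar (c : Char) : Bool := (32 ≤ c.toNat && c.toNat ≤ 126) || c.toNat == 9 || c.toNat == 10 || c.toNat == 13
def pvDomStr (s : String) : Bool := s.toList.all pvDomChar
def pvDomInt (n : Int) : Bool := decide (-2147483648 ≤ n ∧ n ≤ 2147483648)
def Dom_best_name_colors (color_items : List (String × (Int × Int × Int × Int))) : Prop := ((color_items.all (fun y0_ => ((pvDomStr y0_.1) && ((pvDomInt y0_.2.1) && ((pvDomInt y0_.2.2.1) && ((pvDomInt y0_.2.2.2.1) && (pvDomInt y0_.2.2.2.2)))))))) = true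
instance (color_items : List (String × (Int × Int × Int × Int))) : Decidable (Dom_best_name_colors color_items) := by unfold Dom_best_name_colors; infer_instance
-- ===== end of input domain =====

-- B replaces A's sort + groupby + per-group sort by: collect the distinct color values and,
-- for each value in ascending order, take the first item of that value whose name has the
-- fewest ASCII digits (objective: alternative/simpler decomposition; equal on Dom).

-- Both ports order color values by pvEnc, a base-2^64 encoding of the 4-tuple;
-- on Dom (|component| ≤ 2^31) this order coincides with Python's lexicographic tuple order.
def pvEnc (v : Int × Int × Int × Int) : Int :=
  ((v.1 * 18446744073709551616 + v.2.1) * 18446744073709551616 + v.2.2.1) * 18446744073709551616 + v.2.2.2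

-- ===== PORT A =====
-- itertools.groupby(·, key=itemgetter(1)) with the keys dropped: maximal runs of
-- consecutive items whose value components compare equal (exactly groupby's groups).
def pyGroupRuns : List (String × (Int × Int × Int × Int)) → List (List (String × (Int × Int × Int × Int)))
  | [] => []
  | x :: t =>
    match pyGroupRuns t with
    | [] => [[x]]
    | [] :: gs => [x] :: gs
    | (y :: g) :: gs => if x.2 == y.2 then (x :: y :: g) :: gs else [x] :: (y :: g) :: gs

def best_name_colors (color_items : List (String × (Int × Int × Int × Int))) : List (String × (Int × Int × Int × Int)) :=
  -- grouped = sorted_groupby(color_items, key=second)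
  let grouped := pyGroupRuns (PySem.List.sorted color_items (fun p => pvEnc p.2) false)
  -- for each group: yield sorted(color_items, key=_quality)[0];
  -- _quality = len(list(get_digits(key))), get_digits = the chars of the name in string.digits.
  -- groupby's groups are never empty, so color_items[0] never raises ([] branch unreachable).
  grouped.foldl (fun acc g =>
    match PySem.List.sorted g (fun p => (p.1.toList.filter (fun c => decide ('0' ≤ c ∧ c ≤ '9'))).length) false with
    | m :: _ => acc ++ [m]
    | [] => acc) []

-- ===== PORT B =====
-- digits(name) = sum(1 for c in name if c in string.digits)
def pvDigits (s : String) : Nat := s.toList.countP (fun c => decide ('0' ≤ c ∧ c ≤ '9'))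

def best_name_colors_alt (color_items : List (String × (Int × Int × Int × Int))) : List (String × (Int × Int × Int × Int)) :=
  -- seen = set of all value components
  let seen := color_items.foldl (fun s p => PySem.Set.add s p.2) PySem.Set.empty
  -- for value in sorted(seen): yield min(items with that value, key=digit count of the name)
  -- every value in seen occurs in color_items, so min never raises (none branch unreachable).
  (PySem.List.sorted seen (fun v => pvEnc v) false).foldl (fun acc v =>
    match PySem.List.min? (color_items.filter (fun p => p.2 == v)) (fun p => pvDigits p.1) with
    | some m => acc ++ [m]
    | none => acc) []

-- ===== PRECONDITION & SPEC =====
def Spec_best_name_colors (color_items : List (String × (Int × Int × Int × Int))) (out : List (String × (Int × Int × Int × Int))) : Prop := out = best_name_colors_alt color_items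
instance (color_items : List (String × (Int × Int × Int × Int))) (out : List (String × (Int × Int × Int × Int))) : Decidable (Spec_best_name_colors color_items out) := by unfold Spec_best_name_colors; infer_instance

-- ===== CLAIM (what is proved, stated in full; the proofs are below) =====
def Claim_equal_best_name_colors : Prop := ∀ (color_items : List (String × (Int × Int × Int × Int))), Dom_best_name_colors color_items → Spec_best_name_colors color_items (best_name_colors color_items)

-- ===== LEMMAS AND PROOFS =====

-- the sort key of an item
def pvK (p : String × (Int × Int × Int × Int)) : Int := pvEnc p.2

-- pvEnc is injective on Dom-bounded tuples
theorem pvEnc_inj (a b : Int × Int × Int × Int)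
    (ha1 : pvDomInt a.1 = true) (ha2 : pvDomInt a.2.1 = true) (ha3 : pvDomInt a.2.2.1 = true) (ha4 : pvDomInt a.2.2.2 = true)
    (hb1 : pvDomInt b.1 = true) (hb2 : pvDomInt b.2.1 = true) (hb3 : pvDomInt b.2.2.1 = true) (hb4 : pvDomInt b.2.2.2 = true)
    (h : pvEnc a = pvEnc b) : a = b := by
  obtain ⟨a1, a2, a3, a4⟩ := a
  obtain ⟨b1, b2, b3, b4⟩ := b
  simp only [pvDomInt, decide_eq_true_eq] at *
  simp only [pvEnc] at h
  simp only [Prod.mk.injEq]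
  omega

theorem pv_head_insertBy {α : Type} (k : α → Nat) (x : α) (acc : List α) :
    (PySem.List.insertBy (fun a b => decide (k a < k b)) x acc).head? =
      some (match acc.head? with | none => x | some y => if k x < k y then x else y) := by
  cases acc with
  | nil => rfl
  | cons y ys =>
    simp only [PySem.List.insertBy, List.head?]
    by_cases h : k x < k y <;> simp [h]

theorem pv_head_foldl (q : (String × (Int × Int × Int × Int)) → Nat)
    (g : List (String × (Int × Int × Int × Int))) :
    ∀ acc : List (String × (Int × Int × Int × Int)),
    (g.foldl (fun a x => PySem.List.insertBy (fun a b => decide (q a < q b)) x a) acc).head? =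
      g.foldl (fun m x => match m with | none => some x | some m' => if q x < q m' then some x else some m') acc.head? := by
  induction g with
  | nil => intro acc; rfl
  | cons x t ih =>
    intro acc
    simp only [List.foldl_cons]
    rw [ih, pv_head_insertBy]
    congr 1
    cases acc with
    | nil => rfl
    | cons h t2 =>
      simp only [List.head?_cons]
      split <;> rfl

-- the head of a stable sort is Python's min (the first minimal element)
theorem pv_head_sorted_eq_min? (g : List (String × (Int × Int × Int × Int))) (q : (String × (Int × Int × Int × Int)) → Nat) :
    (PySem.List.sorted g q false).head? = PySem.List.min? g q := by
  rw [PySem.List.sorted_eq_foldl_insertBy, PySem.List.min?, pv_head_foldl]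
  simp only [List.head?_nil]
  apply PySem.List.foldl_congr_mem
  intro acc x _
  cases acc <;> rfl

theorem pv_insertBy_pairwise (x : String × (Int × Int × Int × Int)) (acc : List (String × (Int × Int × Int × Int)))
    (h : acc.Pairwise (fun a b => pvK a ≤ pvK b)) :
    (PySem.List.insertBy (fun a b => decide (pvK a < pvK b)) x acc).Pairwise (fun a b => pvK a ≤ pvK b) := by
  induction acc with
  | nil => simp [PySem.List.insertBy]
  | cons y ys ih =>
    simp only [PySem.List.insertBy]
    rcases List.pairwise_cons.mp h with ⟨hy, hys⟩
    by_cases hlt : pvK x < pvK y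
    · simp only [hlt, decide_true, if_true]
      refine List.pairwise_cons.mpr ⟨?_, h⟩
      intro b hb
      rcases hb with _ | hb
      · exact le_of_lt hlt
      · exact le_trans (le_of_lt hlt) (hy _ (by assumption))
    · simp only [hlt, decide_false]
      refine List.pairwise_cons.mpr ⟨?_, ih hys⟩
      intro b hb
      rcases (PySem.List.mem_insertBy _ _ _ _).mp hb with rfl | hb
      · omega
      · exact hy _ hb

-- filtering by one value commutes with inserting into a key-sorted list (stability)
theorem pv_filter_insertBy (v : Int × Int × Int × Int) (x : String × (Int × Int × Int × Int))
    (acc : List (String × (Int × Int × Int × Int))) (h : acc.Pairwise (fun a b => pvK a ≤ pvK b)) :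
    (PySem.List.insertBy (fun a b => decide (pvK a < pvK b)) x acc).filter (fun p => p.2 == v) =
      if x.2 == v then acc.filter (fun p => p.2 == v) ++ [x] else acc.filter (fun p => p.2 == v) := by
  induction acc with
  | nil =>
    simp only [PySem.List.insertBy, List.filter_cons, List.filter_nil]
    by_cases hqx : x.2 = v <;> simp [hqx]
  | cons y ys ih =>
    rcases List.pairwise_cons.mp h with ⟨hy, hys⟩
    simp only [PySem.List.insertBy]
    by_cases hlt : pvK x < pvK y
    · simp only [hlt, decide_true, if_true]
      by_cases hqx : x.2 = v
      · have hempty : (y :: ys).filter (fun p => p.2 == v) = [] := by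
          rw [List.filter_eq_nil_iff]
          intro z hz hzq
          have hzv : z.2 = v := by simpa using hzq
          have hky : pvK y ≤ pvK z := by
            rcases List.mem_cons.mp hz with rfl | hz'
            · omega
            · exact hy _ hz'
          have : pvK x = pvK z := by simp [pvK, hqx, hzv]
          omega
        rw [List.filter_cons, hempty]
        simp [hqx]
      · rw [List.filter_cons]
        simp [hqx]
    · simp only [hlt, decide_false, Bool.false_eq_true, if_false]
      rw [List.filter_cons, List.filter_cons, ih hys]
      by_cases hqx : x.2 = v <;> by_cases hqy : y.2 = v <;> simp [hqx, hqy]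

theorem pv_filter_foldl (v : Int × Int × Int × Int) (xs : List (String × (Int × Int × Int × Int))) :
    ∀ acc, acc.Pairwise (fun a b => pvK a ≤ pvK b) →
    (xs.foldl (fun a x => PySem.List.insertBy (fun a b => decide (pvK a < pvK b)) x a) acc).filter (fun p => p.2 == v) =
      acc.filter (fun p => p.2 == v) ++ xs.filter (fun p => p.2 == v) := by
  induction xs with
  | nil => intro acc _; simp
  | cons x t ih =>
    intro acc hacc
    simp only [List.foldl_cons]
    rw [ih _ (pv_insertBy_pairwise x acc hacc), pv_filter_insertBy v x acc hacc, List.filter_cons]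
    by_cases hqx : x.2 = v <;> simp [hqx]

-- the value-v items of the value-sorted list are the value-v items of the original, in order
theorem pv_filter_sorted (xs : List (String × (Int × Int × Int × Int))) (v : Int × Int × Int × Int) :
    (PySem.List.sorted xs (fun p => pvEnc p.2) false).filter (fun p => p.2 == v) = xs.filter (fun p => p.2 == v) := by
  rw [PySem.List.sorted_eq_foldl_insertBy]
  simpa using pv_filter_foldl v xs [] (by simp)

-- the distinct run values of a list, in run order
def pvRunVals : List (String × (Int × Int × Int × Int)) → List (Int × Int × Int × Int)
  | [] => []
  | x :: t =>
    match pvRunVals t with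
    | [] => [x.2]
    | w :: ws => if x.2 == w then w :: ws else x.2 :: w :: ws

theorem pv_runVals_cons (y : String × (Int × Int × Int × Int)) (t : List (String × (Int × Int × Int × Int))) :
    ∃ ws, pvRunVals (y :: t) = y.2 :: ws := by
  cases h : pvRunVals t with
  | nil => exact ⟨[], by simp [pvRunVals, h]⟩
  | cons w ws =>
    by_cases he : y.2 = w
    · exact ⟨ws, by simp [pvRunVals, h, he]⟩
    · exact ⟨w :: ws, by simp [pvRunVals, h, he]⟩

theorem pv_mem_runVals (ss : List (String × (Int × Int × Int × Int))) (v : Int × Int × Int × Int) :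
    v ∈ pvRunVals ss ↔ v ∈ ss.map (fun p => p.2) := by
  induction ss with
  | nil => simp [pvRunVals]
  | cons x t ih =>
    cases h : pvRunVals t with
    | nil =>
      rw [h] at ih
      simp only [List.not_mem_nil, false_iff] at ih
      have hrv : pvRunVals (x :: t) = [x.2] := by simp [pvRunVals, h]
      rw [hrv, List.map_cons]
      simp only [List.mem_cons]
      tauto
    | cons w ws =>
      rw [h] at ih
      by_cases he : x.2 = w
      · have hrv : pvRunVals (x :: t) = w :: ws := by simp [pvRunVals, h, he]
        rw [hrv, List.map_cons]
        constructor
        · intro hm; exact List.mem_cons.mpr (Or.inr (ih.mp hm))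
        · intro hm
          rcases List.mem_cons.mp hm with rfl | hm
          · exact List.mem_cons.mpr (Or.inl he)
          · exact ih.mpr hm
      · have hrv : pvRunVals (x :: t) = x.2 :: w :: ws := by simp [pvRunVals, h, he]
        rw [hrv, List.map_cons, List.mem_cons, ih, List.mem_cons]

theorem pv_runVals_pairwise (ss : List (String × (Int × Int × Int × Int)))
    (h1 : ss.Pairwise (fun a b => pvK a ≤ pvK b))
    (h2 : ∀ p ∈ ss, ∀ r ∈ ss, pvEnc p.2 = pvEnc r.2 → p.2 = r.2) :
    (pvRunVals ss).Pairwise (fun a b => pvEnc a < pvEnc b) := by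
  induction ss with
  | nil => simp [pvRunVals]
  | cons x t ih =>
    rcases List.pairwise_cons.mp h1 with ⟨hx, ht⟩
    have ih' := ih ht (fun p hp r hr => h2 p (by simp [hp]) r (by simp [hr]))
    have hmemle : ∀ b ∈ pvRunVals t, pvEnc x.2 ≤ pvEnc b := by
      intro b hb
      rcases List.mem_map.mp ((pv_mem_runVals t b).mp hb) with ⟨r, hr, rfl⟩
      exact hx r hr
    cases h : pvRunVals t with
    | nil => simp [pvRunVals, h]
    | cons w ws =>
      rw [h] at ih'
      by_cases he : x.2 = w
      · have hrv : pvRunVals (x :: t) = w :: ws := by simp [pvRunVals, h, he]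
        rw [hrv]; exact ih'
      · have hrv : pvRunVals (x :: t) = x.2 :: w :: ws := by simp [pvRunVals, h, he]
        rw [hrv]
        refine List.pairwise_cons.mpr ⟨?_, ih'⟩
        intro b hb
        rcases List.mem_map.mp ((pv_mem_runVals t b).mp (by rw [h]; exact hb)) with ⟨r, hr, rfl⟩
        rcases lt_or_eq_of_le (hx r hr) with hlt | heq
        · exact hlt
        · have hxr : x.2 = r.2 := h2 x (by simp) r (by simp [hr]) heq
          rcases List.mem_cons.mp hb with rfl | hbws
          · exact absurd hxr he
          · have hw : pvEnc w < pvEnc r.2 := (List.pairwise_cons.mp ih').1 _ hbws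
            have hxw : pvEnc x.2 ≤ pvEnc w := hmemle w (by rw [h]; exact List.mem_cons_self)
            rw [hxr] at hxw
            have : pvK x = pvEnc r.2 := heq
            omega

theorem pv_groupRuns_cons (y : String × (Int × Int × Int × Int)) (t : List (String × (Int × Int × Int × Int))) :
    ∃ g gs, pyGroupRuns (y :: t) = (y :: g) :: gs := by
  cases h : pyGroupRuns t with
  | nil => exact ⟨[], [], by simp [pyGroupRuns, h]⟩
  | cons g0 gs =>
    cases g0 with
    | nil => exact ⟨[], gs, by simp [pyGroupRuns, h]⟩
    | cons z g =>
      by_cases he : y.2 = z.2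
      · exact ⟨z :: g, gs, by simp [pyGroupRuns, h, he]⟩
      · exact ⟨[], (z :: g) :: gs, by simp [pyGroupRuns, h, he]⟩

-- the groups of a value-sorted list are its filters by each distinct value, in order
theorem pv_groupRuns_eq (ss : List (String × (Int × Int × Int × Int)))
    (h1 : ss.Pairwise (fun a b => pvK a ≤ pvK b))
    (h2 : ∀ p ∈ ss, ∀ r ∈ ss, pvEnc p.2 = pvEnc r.2 → p.2 = r.2) :
    pyGroupRuns ss = (pvRunVals ss).map (fun v => ss.filter (fun p => p.2 == v)) := by
  induction ss with
  | nil => simp [pyGroupRuns, pvRunVals]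
  | cons x t ih =>
    rcases List.pairwise_cons.mp h1 with ⟨hx, ht⟩
    have h2t : ∀ p ∈ t, ∀ r ∈ t, pvEnc p.2 = pvEnc r.2 → p.2 = r.2 :=
      fun p hp r hr => h2 p (by simp [hp]) r (by simp [hr])
    have iht := ih ht h2t
    have hpwx := pv_runVals_pairwise (x :: t) h1 h2
    cases t with
    | nil => simp [pyGroupRuns, pvRunVals, List.filter]
    | cons y t' =>
      rcases pv_groupRuns_cons y t' with ⟨g, gs, hgr⟩
      rcases pv_runVals_cons y t' with ⟨ws, hrv⟩
      rw [hgr, hrv, List.map_cons] at iht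
      have hfirst : y :: g = (y :: t').filter (fun p => p.2 == y.2) := (List.cons_eq_cons.mp iht).1
      have hrest : gs = ws.map (fun v => (y :: t').filter (fun p => p.2 == v)) := (List.cons_eq_cons.mp iht).2
      by_cases he : x.2 = y.2
      · have hgr' : pyGroupRuns (x :: y :: t') = (x :: y :: g) :: gs := by
          rw [pyGroupRuns, hgr]; simp [he]
        have hrv' : pvRunVals (x :: y :: t') = y.2 :: ws := by
          rw [pvRunVals, hrv]; simp [he]
        rw [hgr', hrv', List.map_cons]
        rw [hrv'] at hpwx
        have hne : ∀ v ∈ ws, (x.2 == v) = false := by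
          intro v hv
          have hlt : pvEnc y.2 < pvEnc v := (List.pairwise_cons.mp hpwx).1 v hv
          have hnv : y.2 ≠ v := fun hh => by rw [hh] at hlt; omega
          rw [he]; simp [hnv]
        refine List.cons_eq_cons.mpr ⟨?_, ?_⟩
        · rw [List.filter_cons, if_pos (by simp [he])]
          exact congrArg (x :: ·) hfirst
        · rw [hrest]
          refine List.map_congr_left ?_
          intro v hv
          conv_rhs => rw [List.filter_cons]
          rw [if_neg (by simp [hne v hv])]
      · have hgr' : pyGroupRuns (x :: y :: t') = [x] :: (y :: g) :: gs := by
          rw [pyGroupRuns, hgr]; simp [he]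
        have hrv' : pvRunVals (x :: y :: t') = x.2 :: y.2 :: ws := by
          rw [pvRunVals, hrv]; simp [he]
        rw [hgr', hrv', List.map_cons, List.map_cons]
        rw [hrv'] at hpwx
        have hpw1 := (List.pairwise_cons.mp hpwx).1
        have hxne : ∀ v ∈ y.2 :: ws, (x.2 == v) = false := by
          intro v hv
          have hlt : pvEnc x.2 < pvEnc v := hpw1 v hv
          have hnv : x.2 ≠ v := fun hh => by rw [hh] at hlt; omega
          simp [hnv]
        refine List.cons_eq_cons.mpr ⟨?_, List.cons_eq_cons.mpr ⟨?_, ?_⟩⟩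
        · rw [List.filter_cons, if_pos (by simp)]
          have hnil : (y :: t').filter (fun p => p.2 == x.2) = [] := by
            rw [List.filter_eq_nil_iff]
            intro z hz hzq
            have hzv : z.2 = x.2 := by simpa using hzq
            rcases List.mem_cons.mp hz with rfl | hz'
            · exact he (hzv.symm)
            · have hyz : pvK y ≤ pvK z := (List.pairwise_cons.mp ht).1 z hz'
              have hxz : pvK x ≤ pvK y := hx y (by simp)
              have hzx : pvK z = pvK x := by simp [pvK, hzv]
              have hyx : pvEnc y.2 = pvEnc x.2 := by simp only [pvK] at hyz hxz hzx; omega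
              exact he ((h2 x (by simp) y (by simp) hyx.symm))
          rw [hnil]
        · rw [List.filter_cons, if_neg (by simp [hxne y.2 (by simp)])]
          exact hfirst
        · rw [hrest]
          refine List.map_congr_left ?_
          intro v hv
          conv_rhs => rw [List.filter_cons]
          rw [if_neg (by simp [hxne v (List.mem_cons.mpr (Or.inr hv))])]

-- ===== VERDICT (by name: the statement is the Claim_ definition above) =====
theorem best_name_colors_spec : Claim_equal_best_name_colors := by
  intro xs hdom
  unfold Spec_best_name_colors
  simp only [best_name_colors, best_name_colors_alt]
  -- Dom gives componentwise bounds, hence injectivity of pvEnc on the values involved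
  simp only [Dom_best_name_colors, List.all_eq_true, Bool.and_eq_true] at hdom
  have h1 : (PySem.List.sorted xs (fun p => pvEnc p.2) false).Pairwise (fun a b => pvK a ≤ pvK b) :=
    PySem.List.sorted_pairwise xs (fun p => pvEnc p.2)
  have h2 : ∀ p ∈ PySem.List.sorted xs (fun p => pvEnc p.2) false,
      ∀ r ∈ PySem.List.sorted xs (fun p => pvEnc p.2) false, pvEnc p.2 = pvEnc r.2 → p.2 = r.2 := by
    intro p hp r hr he
    have hp' := hdom p ((PySem.List.mem_sorted _ _ _ _).mp hp)
    have hr' := hdom r ((PySem.List.mem_sorted _ _ _ _).mp hr)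
    exact pvEnc_inj p.2 r.2 hp'.2.1 hp'.2.2.1 hp'.2.2.2.1 hp'.2.2.2.2 hr'.2.1 hr'.2.2.1 hr'.2.2.2.1 hr'.2.2.2.2 he
  -- A: fold over groups = flatMap of per-group selections
  have stepA : ∀ gl : List (List (String × (Int × Int × Int × Int))),
      gl.foldl (fun acc g =>
        match PySem.List.sorted g (fun p => (p.1.toList.filter (fun c => decide ('0' ≤ c ∧ c ≤ '9'))).length) false with
        | m :: _ => acc ++ [m]
        | [] => acc) [] =
      gl.flatMap (fun g =>
        match PySem.List.sorted g (fun p => (p.1.toList.filter (fun c => decide ('0' ≤ c ∧ c ≤ '9'))).length) false with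
        | m :: _ => [m]
        | [] => []) := by
    intro gl
    have hc : gl.foldl (fun acc g =>
        match PySem.List.sorted g (fun p => (p.1.toList.filter (fun c => decide ('0' ≤ c ∧ c ≤ '9'))).length) false with
        | m :: _ => acc ++ [m]
        | [] => acc) [] =
      gl.foldl (fun acc g => acc ++
        match PySem.List.sorted g (fun p => (p.1.toList.filter (fun c => decide ('0' ≤ c ∧ c ≤ '9'))).length) false with
        | m :: _ => [m]
        | [] => []) [] := by
      apply PySem.List.foldl_congr_mem
      intro acc g _
      cases PySem.List.sorted g (fun p => (p.1.toList.filter (fun c => decide ('0' ≤ c ∧ c ≤ '9'))).length) false <;> simp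
    rw [hc, PySem.List.foldl_append_eq_flatMap]
    simp
  -- B: fold over sorted distinct values = flatMap of per-value selections
  have stepB : ∀ vl : List (Int × Int × Int × Int),
      vl.foldl (fun acc v =>
        match PySem.List.min? (xs.filter (fun p => p.2 == v)) (fun p => pvDigits p.1) with
        | some m => acc ++ [m]
        | none => acc) [] =
      vl.flatMap (fun v =>
        match PySem.List.min? (xs.filter (fun p => p.2 == v)) (fun p => pvDigits p.1) with
        | some m => [m]
        | none => []) := by
    intro vl
    have hc : vl.foldl (fun acc v =>
        match PySem.List.min? (xs.filter (fun p => p.2 == v)) (fun p => pvDigits p.1) with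
        | some m => acc ++ [m]
        | none => acc) [] =
      vl.foldl (fun acc v => acc ++
        match PySem.List.min? (xs.filter (fun p => p.2 == v)) (fun p => pvDigits p.1) with
        | some m => [m]
        | none => []) [] := by
      apply PySem.List.foldl_congr_mem
      intro acc v _
      cases PySem.List.min? (xs.filter (fun p => p.2 == v)) (fun p => pvDigits p.1) <;> simp
    rw [hc, PySem.List.foldl_append_eq_flatMap]
    simp
  rw [stepA, stepB]
  -- B's seen set is the ordered dedup of the value components
  have hseen : xs.foldl (fun s p => PySem.Set.add s p.2) PySem.Set.empty =
      PySem.Set.ofList (xs.map (fun p => p.2)) := by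
    rw [PySem.Set.ofList_eq_foldl, List.foldl_map]
    rfl
  rw [hseen]
  -- B's sorted distinct values are exactly the run values of A's sorted list
  have hvals : PySem.List.sorted (PySem.Set.ofList (xs.map (fun p => p.2))) (fun v => pvEnc v) false =
      pvRunVals (PySem.List.sorted xs (fun p => pvEnc p.2) false) := by
    apply PySem.List.sorted_eq_of_perm_of_pairwise_lt
    · apply (List.perm_ext_iff_of_nodup ?_ ?_).mpr
      · intro v
        rw [pv_mem_runVals, PySem.Set.mem_ofList]
        exact List.Perm.mem_iff ((PySem.List.sorted_perm xs (fun p => pvEnc p.2) false).map (fun p => p.2))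
      · exact List.Pairwise.imp (fun {a b} hlt => fun hh => by rw [hh] at hlt; omega)
          (pv_runVals_pairwise _ h1 h2)
      · exact PySem.Set.nodup_ofList _
    · exact pv_runVals_pairwise _ h1 h2
  rw [hvals, pv_groupRuns_eq _ h1 h2, List.flatMap_map]
  apply List.flatMap_congr
  intro v hv
  -- a group is the original-order filter (stability), and its quality-sorted head is min
  rw [pv_filter_sorted]
  have hqeq : (fun p : String × (Int × Int × Int × Int) => (p.1.toList.filter (fun c => decide ('0' ≤ c ∧ c ≤ '9'))).length) =
      (fun p : String × (Int × Int × Int × Int) => pvDigits p.1) :=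
    funext fun p => List.countP_eq_length_filter.symm
  rw [hqeq]
  cases hs : PySem.List.sorted (xs.filter (fun p => p.2 == v)) (fun p => pvDigits p.1) false with
  | nil =>
    have hm : PySem.List.min? (xs.filter (fun p => p.2 == v)) (fun p => pvDigits p.1) = none := by
      rw [← pv_head_sorted_eq_min?, hs]; rfl
    rw [hm]
  | cons m t =>
    have hm : PySem.List.min? (xs.filter (fun p => p.2 == v)) (fun p => pvDigits p.1) = some m := by
      rw [← pv_head_sorted_eq_min?, hs]; rfl
    rw [hm]
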